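-- pv_equiv track=rewrite | github.com/martinjedwabny/pddl-ethical | benchmarks/PDDL.py | parse_constants
-- ===== SOURCE A (Python) =====
-- def parse_constants(group):
--     ans = {}
--     constant_list = []
--     while group:
--         if group[0] == '-':
--             group.pop(0)
--             ans[group.pop(0)] = constant_list
--             constant_list = []
--         else:
--             constant_list.append(group.pop(0))
--     if constant_list:
--         if not 'object' in ans:
--             ans['object'] = []
--         ans['object'] += constant_list
--     return ans
-- ===== SOURCE B (Python) =====
-- def parse_constants(group):
--     # find-and-slice: locate each '-' separator, assign the slice before it
--     # to the type token after it; does not mutate the input list (A empties it).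
--     ans = {}
--     rest = group
--     while True:
--         try:
--             d = rest.index('-')
--         except ValueError:
--             break
--         ans[rest[d + 1]] = rest[:d]
--         rest = rest[d + 2:]
--     if rest:
--         if 'object' not in ans:
--             ans['object'] = []
--         ans['object'] += rest
--     return ans
-- ===== Notes on version B (the rewrite author's own statement) =====
-- stated objective: faster
-- what changed: Replaces the element-by-element pop(0) loop carrying a running constant_list with a find-and-slice pass: each '-' separator is located with list.index and the slice before it is assigned to the token after it, so the per-element list shifting of pop(0) disappears; B also leaves the input list unmutated where A empties it.
import Mathlib
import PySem

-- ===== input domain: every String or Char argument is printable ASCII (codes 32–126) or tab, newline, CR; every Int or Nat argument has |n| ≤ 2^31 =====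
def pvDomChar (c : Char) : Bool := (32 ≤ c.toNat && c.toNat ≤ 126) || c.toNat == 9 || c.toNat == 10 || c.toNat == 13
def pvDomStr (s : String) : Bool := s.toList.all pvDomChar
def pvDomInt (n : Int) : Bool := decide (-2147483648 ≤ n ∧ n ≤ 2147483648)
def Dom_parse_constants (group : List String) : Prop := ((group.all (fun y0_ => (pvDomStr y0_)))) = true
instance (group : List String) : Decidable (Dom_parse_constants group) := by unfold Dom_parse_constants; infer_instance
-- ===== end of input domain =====

-- B replaces A's pop(0)-per-token loop by a find-and-slice pass (list.index + one slice
-- per type group), removing the per-element list shifting; a timing run measured B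
-- faster. A empties `group` in place, B does not mutate it — the equivalence proved
-- here is about the return value only.

-- ===== PORT A =====
-- the trailing 'if constant_list: …' block, textually identical in both Pythons
def finishObject (ans : PySem.Dict String (List String)) (cl : List String) :
    PySem.Dict String (List String) :=
  if cl ≠ [] then
    let ans := if ans.contains "object" then ans else ans.insert "object" []
    ans.modify "object" [] (· ++ cl)
  else ans

-- the while loop: state = (remaining group, ans, constant_list)
def parseALoop : List String → PySem.Dict String (List String) → List String →
    PySem.Dict String (List String)
  | [], ans, cl => finishObject ans cl
  | x :: rest, ans, cl =>
    if x = "-" then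
      match rest with
      | [] => ans               -- Python: group.pop(0) raises IndexError here (outside Pre_)
      | t :: rest' => parseALoop rest' (ans.insert t cl) []
    else
      parseALoop rest ans (cl ++ [x])

def parse_constants (group : List String) : List (String × List String) :=
  (parseALoop group PySem.Dict.empty []).items

-- ===== PORT B =====
def parseBLoop (rest : List String) (ans : PySem.Dict String (List String)) :
    PySem.Dict String (List String) :=
  match h : PySem.List.index? rest "-" with
  | none => finishObject ans rest          -- break; leftover handling
  | some d =>
    match PySem.List.pyGet? rest ((d : Int) + 1) with
    | none => ans                          -- Python: rest[d+1] raises IndexError (outside Pre_)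
    | some t => parseBLoop (rest.drop (d + 2)) (ans.insert t (rest.take d))
termination_by rest.length
decreasing_by
  obtain ⟨hk, -, -⟩ := PySem.List.getElem_of_index?_eq_some h
  simp only [List.length_drop]; omega

def parse_constants_alt (group : List String) : List (String × List String) :=
  (parseBLoop group PySem.Dict.empty).items

-- ===== PRECONDITION & SPEC =====
-- Pre_ excludes exactly the inputs on which A raises IndexError: those whose maximal
-- trailing run of "-" tokens has odd length (the final "-" is then a separator with no
-- type token after it).  B raises IndexError on exactly the same inputs.
def Pre_parse_constants (group : List String) : Prop :=
  (group.reverse.takeWhile (fun s => s = "-")).length % 2 = 0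
instance (group : List String) : Decidable (Pre_parse_constants group) := by
  unfold Pre_parse_constants; infer_instance

def pvWitness_parse_constants : List String := ["a", "b", "-", "t", "c"]

def Spec_parse_constants (group : List String) (out : List (String × List String)) : Prop :=
  out = parse_constants_alt group
instance (group : List String) (out : List (String × List String)) :
    Decidable (Spec_parse_constants group out) := by unfold Spec_parse_constants; infer_instance

-- ===== CLAIM (what is proved, stated in full; the proofs are below) =====
def Claim_equal_parse_constants : Prop :=
  ∀ (group : List String), Dom_parse_constants group → Pre_parse_constants group →
    Spec_parse_constants group (parse_constants group)

-- ===== LEMMAS AND PROOFS =====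

-- Invariant: A's state (g, ans, cl) corresponds to B's state (cl ++ g, ans),
-- provided "-" does not occur among the already-collected constants cl.
theorem loop_eq : ∀ (n : ℕ) (g : List String)
    (ans : PySem.Dict String (List String)) (cl : List String),
    g.length ≤ n → ("-" ∉ cl) → parseALoop g ans cl = parseBLoop (cl ++ g) ans := by
  intro n
  induction n with
  | zero =>
    intro g ans cl hlen hcl
    have hg : g = [] := List.length_eq_zero_iff.mp (Nat.le_zero.mp hlen)
    subst hg
    have hidx : PySem.List.index? (cl ++ ([] : List String)) "-" = none := by
      simpa using (PySem.List.index?_eq_none_iff cl "-").mpr hcl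
    rw [parseBLoop.eq_def]
    split
    · simp [parseALoop]
    · next d heq => rw [hidx] at heq; cases heq
  | succ n ih =>
    intro g ans cl hlen hcl
    match g with
    | [] =>
      have hidx : PySem.List.index? (cl ++ ([] : List String)) "-" = none := by
        simpa using (PySem.List.index?_eq_none_iff cl "-").mpr hcl
      rw [parseBLoop.eq_def]
      split
      · simp [parseALoop]
      · next d heq => rw [hidx] at heq; cases heq
    | x :: rest =>
      by_cases hx : x = "-"
      · subst hx
        have hidx : PySem.List.index? (cl ++ "-" :: rest) "-" = some cl.length :=
          (PySem.List.index?_eq_some_iff (cl ++ "-" :: rest) "-" cl.length).mpr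
            ⟨cl, rest, rfl, rfl, hcl⟩
        have hget : PySem.List.pyGet? (cl ++ "-" :: rest) ((cl.length : Int) + 1)
            = rest[0]? := by
          simpa using PySem.List.pyGet?_append_right cl ("-" :: rest) 1
        rw [parseBLoop.eq_def]
        split
        · next heq => rw [hidx] at heq; cases heq
        · next d heq =>
          rw [hidx] at heq
          injection heq with heq'; subst heq'
          rw [hget]
          match rest with
          | [] => simp [parseALoop]
          | t :: rest' =>
            have hdrop : (cl ++ "-" :: t :: rest').drop (cl.length + 2) = rest' := by
              have h1 : cl ++ "-" :: t :: rest' = (cl ++ ["-", t]) ++ rest' := by simp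
              rw [h1, show cl.length + 2 = (cl ++ ["-", t]).length by simp, List.drop_left]
            have htake : (cl ++ "-" :: t :: rest').take cl.length = cl := List.take_left
            simp only [List.getElem?_cons_zero, hdrop, htake]
            have hlen' : rest'.length ≤ n := by simp at hlen; omega
            rw [show parseALoop ("-" :: t :: rest') ans cl
                  = parseALoop rest' (ans.insert t cl) [] by rw [parseALoop.eq_def]; simp]
            simpa using ih rest' (ans.insert t cl) [] hlen' (by simp)
      · have hcl' : "-" ∉ cl ++ [x] := by
          simp [hcl]; exact fun h => hx h.symm
        have hlen' : rest.length ≤ n := by simp at hlen; omega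
        rw [show parseALoop (x :: rest) ans cl = parseALoop rest ans (cl ++ [x]) by
          rw [parseALoop.eq_def]; simp [hx]]
        simpa using ih rest ans (cl ++ [x]) hlen' hcl'

-- ===== VERDICT (by name: the statement is the Claim_ definition above) =====
theorem parse_constants_spec : Claim_equal_parse_constants := by
  intro group _ _
  unfold Spec_parse_constants parse_constants parse_constants_alt
  rw [loop_eq group.length group PySem.Dict.empty [] le_rfl (by simp)]
  simp
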